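-- pv_equiv track=rewrite | github.com/AkshayKumarC132/PeerCheck | api/new_utils.py | _paragraph_index_for_offset
-- ===== SOURCE A (Python) =====
-- def _paragraph_index_for_offset(paragraphs, offset):
--     """Map a character offset within the concatenated paragraph text to its index."""
--     running = 0
--     for idx, (_element, _text, normalized) in enumerate(paragraphs):
--         end = running + len(normalized)
--         if offset <= end:
--             return idx
--         running = end + 1  # account for the joining newline
--     return max(len(paragraphs) - 1, 0)
-- ===== SOURCE B (Python) =====
-- def _paragraph_index_for_offset(paragraphs, offset):
--     """Map a character offset within the concatenated paragraph text to its index."""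
--     ends = []
--     cum = 0
--     for _element, _text, normalized in paragraphs:
--         cum += len(normalized)
--         ends.append(cum)
--         cum += 1  # account for the joining newline
--     # binary search: first index whose cumulative end reaches the offset
--     lo, hi = 0, len(ends)
--     while lo < hi:
--         mid = (lo + hi) // 2
--         if ends[mid] < offset:
--             lo = mid + 1
--         else:
--             hi = mid
--     if lo == len(paragraphs):
--         return max(len(paragraphs) - 1, 0)
--     return lo
-- ===== Notes on version B (the rewrite author's own statement) =====
-- stated objective: alternative
-- what changed: B precomputes a prefix-sum table of cumulative paragraph end offsets (with the +1 newline gaps) and finds the answer by binary search over that table, instead of A's single running linear scan with early return.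
import Mathlib
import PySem

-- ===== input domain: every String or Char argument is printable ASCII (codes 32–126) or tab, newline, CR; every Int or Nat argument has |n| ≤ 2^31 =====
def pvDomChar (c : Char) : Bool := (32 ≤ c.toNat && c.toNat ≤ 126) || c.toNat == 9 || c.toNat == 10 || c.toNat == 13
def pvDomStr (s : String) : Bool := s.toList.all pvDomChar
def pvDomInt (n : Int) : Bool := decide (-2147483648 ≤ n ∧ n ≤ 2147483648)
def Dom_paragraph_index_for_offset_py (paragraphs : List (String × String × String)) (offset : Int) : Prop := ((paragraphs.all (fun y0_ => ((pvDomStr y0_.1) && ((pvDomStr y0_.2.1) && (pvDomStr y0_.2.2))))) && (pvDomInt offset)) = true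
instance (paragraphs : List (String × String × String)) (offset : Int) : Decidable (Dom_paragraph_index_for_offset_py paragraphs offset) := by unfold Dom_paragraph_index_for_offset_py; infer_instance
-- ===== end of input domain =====

-- B replaces A's running linear scan by a prefix-sum table of cumulative end offsets plus a binary search over it (alternative algorithm, same result).


-- ===== PORT A =====
-- A's loop: running total, early return of the enumerate index when offset <= end.
def pvALoop (offset : Int) : List (String × String × String) → Int → Int → Option Int
  | [], _, _ => none
  | p :: rest, running, idx =>
    if offset ≤ running + PySem.Str.len p.2.2 then some idx
    else pvALoop offset rest (running + PySem.Str.len p.2.2 + 1) (idx + 1)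

def paragraph_index_for_offset_py (paragraphs : List (String × String × String)) (offset : Int) : Int :=
  match pvALoop offset paragraphs 0 0 with
  | some i => i
  | none => max ((paragraphs.length : Int) - 1) 0

-- ===== PORT B =====
-- the loop building Source B's prefix-sum table `ends` of cumulative end offsets (cum += len; append; cum += 1)
def pvEnds : List (String × String × String) → Int → List Int
  | [], _ => []
  | p :: rest, cum => (cum + PySem.Str.len p.2.2) :: pvEnds rest (cum + PySem.Str.len p.2.2 + 1)

-- the while-loop binary search of Source B (measure hi - lo)
def pvBisect (a : List Int) (x : Int) (lo hi : Nat) : Nat :=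
  if h : lo < hi then
    if a.getD ((lo + hi) / 2) 0 < x then pvBisect a x ((lo + hi) / 2 + 1) hi
    else pvBisect a x lo ((lo + hi) / 2)
  else lo
termination_by hi - lo
decreasing_by all_goals omega

def paragraph_index_for_offset_py_alt (paragraphs : List (String × String × String)) (offset : Int) : Int :=
  if pvBisect (pvEnds paragraphs 0) offset 0 (pvEnds paragraphs 0).length = paragraphs.length
  then max ((paragraphs.length : Int) - 1) 0
  else ((pvBisect (pvEnds paragraphs 0) offset 0 (pvEnds paragraphs 0).length : Nat) : Int)

-- ===== PRECONDITION & SPEC =====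
def Spec_paragraph_index_for_offset_py (paragraphs : List (String × String × String)) (offset : Int) (out : Int) : Prop := out = paragraph_index_for_offset_py_alt paragraphs offset
instance (paragraphs : List (String × String × String)) (offset : Int) (out : Int) : Decidable (Spec_paragraph_index_for_offset_py paragraphs offset out) := by unfold Spec_paragraph_index_for_offset_py; infer_instance

-- ===== CLAIM (what is proved, stated in full; the proofs are below) =====
def Claim_equal_paragraph_index_for_offset_py : Prop := ∀ (paragraphs : List (String × String × String)) (offset : Int), Dom_paragraph_index_for_offset_py paragraphs offset → Spec_paragraph_index_for_offset_py paragraphs offset (paragraph_index_for_offset_py paragraphs offset)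

-- ===== LEMMAS AND PROOFS =====

-- every entry of the ends table is ≥ the starting cumulative value
theorem pvEnds_lower (ps : List (String × String × String)) (c : Int) :
    ∀ y ∈ pvEnds ps c, c ≤ y := by
  induction ps generalizing c with
  | nil => intro y hy; simp [pvEnds] at hy
  | cons p rest ih =>
    intro y hy
    simp only [pvEnds, List.mem_cons] at hy
    have hlen : (0 : Int) ≤ PySem.Str.len p.2.2 := by simp [PySem.Str.len_eq]
    rcases hy with h | h
    · omega
    · have := ih (c + PySem.Str.len p.2.2 + 1) y h
      omega

-- the ends table is nondecreasing
theorem pvEnds_sorted (ps : List (String × String × String)) (c : Int) :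
    (pvEnds ps c).Pairwise (· ≤ ·) := by
  induction ps generalizing c with
  | nil => simp [pvEnds]
  | cons p rest ih =>
    simp only [pvEnds, List.pairwise_cons]
    refine ⟨fun y hy => ?_, ih _⟩
    have := pvEnds_lower rest (c + PySem.Str.len p.2.2 + 1) y hy
    omega

theorem pvEnds_length (ps : List (String × String × String)) (c : Int) :
    (pvEnds ps c).length = ps.length := by
  induction ps generalizing c with
  | nil => simp [pvEnds]
  | cons p rest ih => simp [pvEnds, ih]

-- A's loop returns the first index of the ends table reaching offset (findIdx), shifted by idx
theorem pvALoop_eq_findIdx (offset : Int) (ps : List (String × String × String)) (c idx : Int) :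
    pvALoop offset ps c idx =
      (if (pvEnds ps c).findIdx (fun e => offset ≤ e) < (pvEnds ps c).length
        then some (idx + ((pvEnds ps c).findIdx (fun e => offset ≤ e) : Int))
        else none) := by
  induction ps generalizing c idx with
  | nil => simp [pvALoop, pvEnds]
  | cons p rest ih =>
    simp only [pvALoop, pvEnds]
    by_cases h : offset ≤ c + PySem.Str.len p.2.2
    · have hd : decide (offset ≤ c + PySem.Str.len p.2.2) = true := decide_eq_true h
      simp only [List.findIdx_cons, hd, cond_true, List.length_cons]
      rw [if_pos h, if_pos (Nat.succ_pos _)]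
      simp
    · have hd : decide (offset ≤ c + PySem.Str.len p.2.2) = false := decide_eq_false h
      rw [if_neg h, ih]
      simp only [List.findIdx_cons, hd, cond_false, List.length_cons]
      by_cases h2 : (pvEnds rest (c + PySem.Str.len p.2.2 + 1)).findIdx (fun e => offset ≤ e)
          < (pvEnds rest (c + PySem.Str.len p.2.2 + 1)).length
      · rw [if_pos h2, if_pos (by omega)]
        congr 1
        push_cast
        ring
      · rw [if_neg h2, if_neg (by omega)]

-- the binary search computes findIdx on a nondecreasing list, given lo ≤ findIdx ≤ hi ≤ length
theorem pvBisect_eq_findIdx (a : List Int) (x : Int) (hs : a.Pairwise (· ≤ ·)) :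
    ∀ lo hi, lo ≤ a.findIdx (fun e => x ≤ e) → a.findIdx (fun e => x ≤ e) ≤ hi →
      hi ≤ a.length → pvBisect a x lo hi = a.findIdx (fun e => x ≤ e) := by
  intro lo hi
  induction hn : hi - lo using Nat.strong_induction_on generalizing lo hi with
  | _ n ih =>
    intro h1 h2 h3
    set f := a.findIdx (fun e => x ≤ e) with hf
    rw [pvBisect]
    by_cases hlt : lo < hi
    · rw [dif_pos hlt]
      have hmlo : lo ≤ (lo + hi) / 2 := by omega
      have hmhi : (lo + hi) / 2 < hi := by omega
      have hmlen : (lo + hi) / 2 < a.length := by omega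
      have hgd : a.getD ((lo + hi) / 2) 0 = a[(lo + hi) / 2] := List.getD_eq_getElem a 0 hmlen
      by_cases hc : a.getD ((lo + hi) / 2) 0 < x
      · -- a[mid] < x, so f > mid
        rw [if_pos hc]
        have hmf : (lo + hi) / 2 < f := by
          by_contra hle
          have hfm : f ≤ (lo + hi) / 2 := by omega
          have hflen : f < a.length := by omega
          have hpf : (fun e => decide (x ≤ e)) a[f] = true := List.findIdx_getElem (w := hflen)
          simp only [decide_eq_true_eq] at hpf
          have hmono : a[f] ≤ a[(lo + hi) / 2] := by
            rcases Nat.lt_or_ge f ((lo + hi) / 2) with hlt2 | hge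
            · exact (List.pairwise_iff_getElem.mp hs) f ((lo + hi) / 2) hflen hmlen hlt2
            · have : f = (lo + hi) / 2 := by omega
              simp [this]
          rw [hgd] at hc
          omega
        have hm1 : hi - ((lo + hi) / 2 + 1) < n := by omega
        exact ih _ hm1 ((lo + hi) / 2 + 1) hi rfl hmf h2 h3
      · -- x ≤ a[mid], so f ≤ mid
        rw [if_neg hc]
        have hfm : f ≤ (lo + hi) / 2 := by
          by_contra hgt
          have hm : (lo + hi) / 2 < a.findIdx (fun e => x ≤ e) := by omega
          have : (fun e => decide (x ≤ e)) a[(lo + hi) / 2] = false :=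
            List.not_of_lt_findIdx hm
          simp only [decide_eq_false_iff_not] at this
          rw [hgd] at hc
          omega
        have hm1 : (lo + hi) / 2 - lo < n := by omega
        exact ih _ hm1 lo ((lo + hi) / 2) rfl h1 hfm (by omega)
    · rw [dif_neg hlt]
      omega

-- ===== VERDICT (by name: the statement is the Claim_ definition above) =====
theorem paragraph_index_for_offset_py_spec : Claim_equal_paragraph_index_for_offset_py := by
  intro ps offset _
  unfold Spec_paragraph_index_for_offset_py
  unfold paragraph_index_for_offset_py paragraph_index_for_offset_py_alt
  have hlen : (pvEnds ps 0).length = ps.length := pvEnds_length ps 0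
  have hb : pvBisect (pvEnds ps 0) offset 0 (pvEnds ps 0).length
      = (pvEnds ps 0).findIdx (fun e => offset ≤ e) :=
    pvBisect_eq_findIdx (pvEnds ps 0) offset (pvEnds_sorted ps 0) 0 (pvEnds ps 0).length
      (Nat.zero_le _) List.findIdx_le_length (le_refl _)
  rw [pvALoop_eq_findIdx offset ps 0 0, hb]
  by_cases hflt : (pvEnds ps 0).findIdx (fun e => offset ≤ e) < (pvEnds ps 0).length
  · rw [if_pos hflt, if_neg (by omega)]
    simp
  · rw [if_neg hflt]
    have hle : (pvEnds ps 0).findIdx (fun e => offset ≤ e) ≤ (pvEnds ps 0).length :=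
      List.findIdx_le_length
    rw [if_pos (by omega)]
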